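-- pv_equiv track=rewrite | github.com/Taoge123/OptimizedLeetcode | LeetcodeNew/HashTable/LC_599_Minimum_Index_Sum_of_Two_Lists.py | findRestaurant
-- ===== SOURCE A (Python) =====
-- from collections import defaultdict
--
-- def findRestaurant(list1, list2):
--     C=list(set(list1)&set(list2))
--     if len(C)==1:
--         return C
--     elif len(C)>1:
--         index_name_dict=defaultdict(list)
--         for name in C:
--             index1=list1.index(name)
--             index2=list2.index(name)
--             index_sum=index1+index2
--             index_name_dict[index_sum].append(name)
--         return index_name_dict[min(index_name_dict.keys())]
-- ===== SOURCE B (Python) =====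
-- def findRestaurant(list1, list2):
--     best_sum = None
--     best = None
--     for name in sorted(set(list1) & set(list2)):
--         s = list1.index(name) + list2.index(name)
--         if best_sum is None or s < best_sum:
--             best_sum = s
--             best = [name]
--         elif s == best_sum:
--             best.append(name)
--     return best
-- ===== Notes on version B (the rewrite author's own statement) =====
-- stated objective: simpler
-- what changed: replaces A's two-phase grouping (build a defaultdict from index-sum to name lists, then look up the group of the minimal key) by a single min-tracking pass over the sorted intersection that keeps the current best sum and its name list
-- outside the precondition, e.g. on findRestaurant(['x'], ['y']): A returns None, B returns None; on findRestaurant(['b', 'b', 'd'], ['d', 'd', 'b', 'b']): A returns ['d', 'b'], B returns ['b', 'd']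
import Mathlib
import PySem

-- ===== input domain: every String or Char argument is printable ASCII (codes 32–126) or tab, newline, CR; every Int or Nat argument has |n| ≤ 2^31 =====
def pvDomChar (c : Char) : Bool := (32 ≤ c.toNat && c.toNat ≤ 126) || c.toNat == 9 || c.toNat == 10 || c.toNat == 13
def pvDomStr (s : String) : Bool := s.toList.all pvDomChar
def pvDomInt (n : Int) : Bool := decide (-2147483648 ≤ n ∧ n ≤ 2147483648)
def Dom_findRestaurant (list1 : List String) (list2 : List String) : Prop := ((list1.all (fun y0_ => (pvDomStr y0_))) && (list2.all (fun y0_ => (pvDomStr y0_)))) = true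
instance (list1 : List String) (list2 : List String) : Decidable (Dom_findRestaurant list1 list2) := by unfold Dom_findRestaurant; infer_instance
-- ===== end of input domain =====

-- B replaces A's defaultdict grouping-then-min by one min-tracking pass over the sorted intersection
-- (simpler; not claimed faster). Equivalence is about the RETURN value; neither program mutates its arguments.

-- index-sum of a name (list1.index(name) + list2.index(name)); inside the ports the name is always a member
-- of both lists, so the .getD 0 default never fires (Python's .index raises only on a missing element).
def pvIdxSum (list1 : List String) (list2 : List String) (name : String) : Int :=
  (((PySem.List.index? list1 name).getD 0 : Nat) : Int) + (((PySem.List.index? list2 name).getD 0 : Nat) : Int)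

-- ===== PORT A =====
-- loop body of A: index_name_dict[index_sum].append(name) on a defaultdict(list)
def pvStepA (f : String → Int) (d : PySem.Dict Int (List String)) (x : String) : PySem.Dict Int (List String) :=
  PySem.Dict.modify d (f x) [] (fun l => l ++ [x])

def findRestaurant (list1 : List String) (list2 : List String) : List String :=
  let C : List String := PySem.Set.inter (PySem.Set.ofList list1) (PySem.Set.ofList list2)
  if C.length == 1 then C
  else if C.length > 1 then
    let d : PySem.Dict Int (List String) :=
      C.foldl (pvStepA (pvIdxSum list1 list2)) PySem.Dict.empty
    match PySem.List.min? d.keys (fun k => k) with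
    | some m => d.getD m []
    | none => []      -- unreachable: the dict is nonempty when len(C) > 1
  else []             -- Python falls off the end and returns None here (empty intersection); outside Pre_

-- ===== PORT B =====
-- loop body of B: track (best_sum, best); none = Python's initial best_sum is None / best is None
def pvStepB (f : String → Int) (acc : Option (Int × List String)) (x : String) : Option (Int × List String) :=
  match acc with
  | none => some (f x, [x])
  | some (bs, bl) =>
    if f x < bs then some (f x, [x])
    else if f x == bs then some (bs, bl ++ [x])
    else some (bs, bl)

def findRestaurant_alt (list1 : List String) (list2 : List String) : List String :=
  let C : List String :=
    PySem.List.sorted (PySem.Set.inter (PySem.Set.ofList list1) (PySem.Set.ofList list2)) (fun x => x) false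
  match C.foldl (pvStepB (pvIdxSum list1 list2)) none with
  | some (_, bl) => bl
  | none => []        -- Python's best is still None here (empty intersection); outside Pre_

-- ===== PRECONDITION & SPEC =====
-- Pre_ excludes (a) an empty intersection, where A returns None, which is not a value of the declared
-- List type, and (b) index-sum ties for the minimum, where A's output order is an accident of Python's
-- hash-dependent set-iteration order (B then emits the tied names in sorted order instead).
def Pre_findRestaurant (list1 : List String) (list2 : List String) : Prop :=
  PySem.Set.inter (PySem.Set.ofList list1) (PySem.Set.ofList list2) ≠ [] ∧
  ∃ m ∈ PySem.Set.inter (PySem.Set.ofList list1) (PySem.Set.ofList list2),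
    ∀ y ∈ PySem.Set.inter (PySem.Set.ofList list1) (PySem.Set.ofList list2),
      y ≠ m → pvIdxSum list1 list2 m < pvIdxSum list1 list2 y
instance (list1 : List String) (list2 : List String) : Decidable (Pre_findRestaurant list1 list2) := by
  unfold Pre_findRestaurant; infer_instance

def pvWitness_findRestaurant : List String × List String := (["a", "b"], ["b", "b", "a"])

def Spec_findRestaurant (list1 : List String) (list2 : List String) (out : List String) : Prop := out = findRestaurant_alt list1 list2
instance (list1 : List String) (list2 : List String) (out : List String) : Decidable (Spec_findRestaurant list1 list2 out) := by unfold Spec_findRestaurant; infer_instance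

-- ===== CLAIM (what is proved, stated in full; the proofs are below) =====
def Claim_equal_findRestaurant : Prop := ∀ (list1 : List String) (list2 : List String), Dom_findRestaurant list1 list2 → Pre_findRestaurant list1 list2 → Spec_findRestaurant list1 list2 (findRestaurant list1 list2)

-- ===== LEMMAS AND PROOFS =====

-- once the best is the strict minimum, B's fold never changes it
theorem pv_bfold_stay (f : String → Int) (C : List String) (m : String)
    (h : ∀ y ∈ C, f m < f y) :
    C.foldl (pvStepB f) (some (f m, [m])) = some (f m, [m]) := by
  induction C with
  | nil => rfl
  | cons y rest ih =>
    have hy := h y (List.mem_cons_self)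
    have h1 : ¬ (f y < f m) := by omega
    have h2 : ¬ (f y = f m) := by omega
    simp only [List.foldl_cons, pvStepB, if_neg h1, beq_iff_eq, if_neg h2]
    exact ih (fun z hz => h z (List.mem_cons_of_mem _ hz))

-- B's fold over any list containing a unique strict minimizer returns exactly that minimizer
theorem pv_bfold_min (f : String → Int) (C : List String) (m : String)
    (hm : m ∈ C) (hnd : C.Nodup)
    (hmin : ∀ y ∈ C, y ≠ m → f m < f y) :
    ∀ acc, (acc = none ∨ ∃ s l, acc = some (s, l) ∧ f m < s) →
      C.foldl (pvStepB f) acc = some (f m, [m]) := by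
  induction C with
  | nil => cases hm
  | cons y rest ih =>
    intro acc hacc
    rcases List.mem_cons.mp hm with hym | hmr
    · -- head = m : best becomes (f m, [m]) and stays
      subst hym
      have hnotin : m ∉ rest := (List.nodup_cons.mp hnd).1
      have hrest : ∀ z ∈ rest, f m < f z := by
        intro z hz
        exact hmin z (List.mem_cons_of_mem _ hz) (fun h => hnotin (h ▸ hz))
      have hstep : pvStepB f acc m = some (f m, [m]) := by
        rcases hacc with h | ⟨s, l, h, hlt⟩
        · simp [h, pvStepB]
        · simp [h, pvStepB, if_pos hlt]
      simp only [List.foldl_cons, hstep]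
      exact pv_bfold_stay f rest m hrest
    · -- y ≠ m : the invariant is preserved
      have hym : y ≠ m := by rintro rfl; exact (List.nodup_cons.mp hnd).1 hmr
      have hlt : f m < f y := hmin y (List.mem_cons_self) hym
      simp only [List.foldl_cons]
      refine ih hmr (List.nodup_cons.mp hnd).2
        (fun z hz hzm => hmin z (List.mem_cons_of_mem _ hz) hzm) _ ?_
      right
      rcases hacc with h | ⟨s, l, h, hs⟩
      · exact ⟨f y, [y], by simp [h, pvStepB], hlt⟩
      · subst h
        by_cases h1 : f y < s
        · exact ⟨f y, [y], by simp [pvStepB, if_pos h1], hlt⟩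
        · by_cases h2 : f y = s
          · exact ⟨s, l ++ [y], by simp [pvStepB, h2], hs⟩
          · exact ⟨s, l, by simp [pvStepB, if_neg h1, h2], hs⟩

-- the loop body of Python's min over Ints
def pvMinStep (acc : Option Int) (x : Int) : Option Int :=
  match acc with
  | none => some x
  | some m => if x < m then some x else some m

theorem pv_minstep_stay (a : Int) (t : List Int) (h : ∀ b ∈ t, ¬ b < a) :
    t.foldl pvMinStep (some a) = some a := by
  induction t with
  | nil => rfl
  | cons b rest ih =>
    simp only [List.foldl_cons, pvMinStep, if_neg (h b (List.mem_cons_self))]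
    exact ih (fun z hz => h z (List.mem_cons_of_mem _ hz))

theorem pv_minstep_main (a : Int) (t : List Int) (hat : a ∈ t)
    (hstrict : ∀ b ∈ t, b ≠ a → a < b) :
    ∀ acc, (acc = none ∨ ∃ c, acc = some c ∧ a < c) →
      t.foldl pvMinStep acc = some a := by
  induction t with
  | nil => cases hat
  | cons b rest ih =>
    intro acc hacc
    by_cases hba : b = a
    · subst hba
      have hstep : pvMinStep acc b = some b := by
        rcases hacc with rfl | ⟨c, rfl, hc⟩
        · rfl
        · simp [pvMinStep, if_pos hc]
      simp only [List.foldl_cons, hstep]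
      exact pv_minstep_stay b rest (fun z hz h => by
        by_cases hzb : z = b
        · omega
        · have := hstrict z (List.mem_cons_of_mem _ hz) hzb; omega)
    · have har : a ∈ rest := by
        rcases List.mem_cons.mp hat with h | h
        · exact absurd h.symm hba
        · exact h
      have hb : a < b := hstrict b (List.mem_cons_self) hba
      simp only [List.foldl_cons]
      refine ih har (fun z hz => hstrict z (List.mem_cons_of_mem _ hz)) _ ?_
      right
      rcases hacc with rfl | ⟨c, rfl, hc⟩
      · exact ⟨b, rfl, hb⟩
      · by_cases h1 : b < c
        · exact ⟨b, by simp [pvMinStep, if_pos h1], hb⟩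
        · exact ⟨c, by simp [pvMinStep, if_neg h1], hc⟩

-- Python's min over a list with a unique strict least element
theorem pv_min?_eq_of_strict (l : List Int) (a : Int)
    (ha : a ∈ l) (hmin : ∀ b ∈ l, b ≠ a → a < b) :
    PySem.List.min? l (fun k => k) = some a := by
  have hfun : PySem.List.min? l (fun k => k) = l.foldl pvMinStep none := by
    simp only [PySem.List.min?]
    congr 1
    funext acc x
    cases acc <;> rfl
  rw [hfun]
  exact pv_minstep_main a l ha hmin none (Or.inl rfl)

-- A's grouping fold: the entry at key k collects, in order, the names whose index-sum is k
theorem pv_getD_afold (f : String → Int) (C : List String) :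
    ∀ (d : PySem.Dict Int (List String)) (k : Int),
      (C.foldl (pvStepA f) d).getD k [] = d.getD k [] ++ C.filter (fun x => f x == k) := by
  induction C with
  | nil => intro d k; simp
  | cons x rest ih =>
    intro d k
    simp only [List.foldl_cons, List.filter_cons]
    rw [ih]
    have hmod : (pvStepA f d x).getD k [] =
        if k = f x then d.getD (f x) [] ++ [x] else d.getD k [] := by
      simp only [pvStepA, PySem.Dict.modify]
      rw [PySem.Dict.getD_insert]
    by_cases h : f x = k
    · simp only [hmod, h]
      simp [List.append_assoc]
    · have : (f x == k) = false := by simp [h]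
      simp [hmod, Ne.symm h, this]

-- a Nodup list with exactly one element satisfying p filters to that element
theorem pv_filter_unique (p : String → Bool) (C : List String) (m : String)
    (hnd : C.Nodup) (hm : m ∈ C) (hpm : p m = true)
    (hother : ∀ y ∈ C, y ≠ m → p y = false) :
    C.filter p = [m] := by
  induction C with
  | nil => cases hm
  | cons y rest ih =>
    rcases List.mem_cons.mp hm with rfl | hmr
    · have hnotin : m ∉ rest := (List.nodup_cons.mp hnd).1
      have : rest.filter p = [] := by
        apply List.filter_eq_nil_iff.mpr
        intro z hz
        have : z ≠ m := fun h => hnotin (h ▸ hz)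
        simp [hother z (List.mem_cons_of_mem _ hz) this]
      simp [hpm, this]
    · have hym : y ≠ m := by rintro rfl; exact (List.nodup_cons.mp hnd).1 hmr
      have hpy : p y = false := hother y (List.mem_cons_self) hym
      rw [List.filter_cons, if_neg (by simp [hpy])]
      exact ih (List.nodup_cons.mp hnd).2 hmr
        (fun z hz => hother z (List.mem_cons_of_mem _ hz))

-- the keys of A's dict are the distinct index-sums, in first-occurrence order
theorem pv_keys_afold (f : String → Int) (C : List String) :
    (C.foldl (pvStepA f) PySem.Dict.empty).keys = PySem.Set.ofList (C.map f) := by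
  have h := PySem.Dict.keys_foldl_modify_key C f ([] : List String)
    (fun _ x => fun l => l ++ [x]) PySem.Dict.empty
  simpa [pvStepA, PySem.Dict.keys_empty, PySem.Set.update_nil_left] using h

-- A's dict phase (fold, min over keys, lookup) returns the unique minimizer alone
theorem pv_afold_result (f : String → Int) (C : List String) (m : String)
    (hnd : C.Nodup) (hm : m ∈ C)
    (hmin : ∀ y ∈ C, y ≠ m → f m < f y) :
    (match PySem.List.min? (C.foldl (pvStepA f) PySem.Dict.empty).keys (fun k => k) with
     | some k => (C.foldl (pvStepA f) PySem.Dict.empty).getD k []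
     | none => []) = [m] := by
  have hkeys := pv_keys_afold f C
  have hmem : f m ∈ (C.foldl (pvStepA f) PySem.Dict.empty).keys := by
    rw [hkeys, PySem.Set.mem_ofList]
    exact List.mem_map_of_mem hm
  have hstrict : ∀ b ∈ (C.foldl (pvStepA f) PySem.Dict.empty).keys, b ≠ f m → f m < b := by
    rw [hkeys]
    intro b hb hbne
    rw [PySem.Set.mem_ofList] at hb
    obtain ⟨y, hy, rfl⟩ := List.mem_map.mp hb
    by_cases hym : y = m
    · subst hym; exact absurd rfl hbne
    · exact hmin y hy hym
  rw [pv_min?_eq_of_strict _ (f m) hmem hstrict]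
  show (C.foldl (pvStepA f) PySem.Dict.empty).getD (f m) [] = [m]
  rw [pv_getD_afold]
  simp only [PySem.Dict.getD, PySem.Dict.get?, PySem.Dict.empty]
  rw [pv_filter_unique (fun x => f x == f m) C m hnd hm (by simp)
    (fun y hy hym => by simp [Int.ne_of_gt (hmin y hy hym)])]
  simp

-- A's whole body (both list-length branches) returns the unique minimizer alone
theorem pv_a_result (f : String → Int) (C : List String) (m : String)
    (hne : C ≠ []) (hnd : C.Nodup) (hm : m ∈ C)
    (hmin : ∀ y ∈ C, y ≠ m → f m < f y) :
    (if (C.length == 1) = true then C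
     else if C.length > 1 then
       match PySem.List.min? ((C.foldl (pvStepA f) PySem.Dict.empty)).keys (fun k => k) with
       | some k => (C.foldl (pvStepA f) PySem.Dict.empty).getD k []
       | none => []
     else []) = [m] := by
  by_cases h1 : C.length = 1
  · obtain ⟨c, hc⟩ := List.length_eq_one_iff.mp h1
    subst hc
    have hmc : m = c := by simpa using hm
    simp [hmc]
  · have h0 : C.length ≠ 0 := fun h => hne (List.length_eq_zero_iff.mp h)
    have hlen : C.length > 1 := by omega
    rw [if_neg (by simp [h1] : ¬ ((C.length == 1) = true)), if_pos hlen]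
    exact pv_afold_result f C m hnd hm hmin

-- ===== VERDICT (by name: the statement is the Claim_ definition above) =====
theorem findRestaurant_spec : Claim_equal_findRestaurant := by
  intro list1 list2 _ hpre
  obtain ⟨hne, m, hmC, hmin⟩ := hpre
  have hnd : (PySem.Set.inter (PySem.Set.ofList list1) (PySem.Set.ofList list2)).Nodup :=
    PySem.Set.nodup_inter _ _ (PySem.Set.nodup_ofList _)
  have hndS : (PySem.List.sorted (PySem.Set.inter (PySem.Set.ofList list1) (PySem.Set.ofList list2)) (fun x => x) false).Nodup :=
    ((PySem.List.sorted_perm _ (fun x => x) false).nodup_iff).mpr hnd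
  have hmS : m ∈ PySem.List.sorted (PySem.Set.inter (PySem.Set.ofList list1) (PySem.Set.ofList list2)) (fun x => x) false :=
    (PySem.List.mem_sorted _ (fun x => x) false m).mpr hmC
  have hminS : ∀ y ∈ PySem.List.sorted (PySem.Set.inter (PySem.Set.ofList list1) (PySem.Set.ofList list2)) (fun x => x) false,
      y ≠ m → pvIdxSum list1 list2 m < pvIdxSum list1 list2 y := by
    intro y hy
    exact hmin y ((PySem.List.mem_sorted _ (fun x => x) false y).mp hy)
  have hB := pv_bfold_min (pvIdxSum list1 list2) _ m hmS hndS hminS none (Or.inl rfl)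
  have hA := pv_a_result (pvIdxSum list1 list2) _ m hne hnd hmC hmin
  unfold Spec_findRestaurant findRestaurant findRestaurant_alt
  simp only []
  rw [hB, hA]
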